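-- pv_equiv track=rewrite | github.com/ADOBApps/adobmd_converter | cif_parser.py | _split_data_blocks
-- ===== SOURCE A (Python) =====
-- from typing import List, Dict, Tuple, Optional
--
-- def _split_data_blocks(lines: List[str]) -> List[List[str]]:
--     """Split CIF into data blocks (data_XXX)"""
--     blocks = []
--     current_block = []
--     in_block = False
--
--     for line in lines:
--         if line.strip().startswith('data_'):
--             if current_block:
--                 blocks.append(current_block)
--             current_block = [line]
--             in_block = True
--         elif in_block:
--             current_block.append(line)
--
--     if current_block:
--         blocks.append(current_block)
--
--     return blocks
-- ===== SOURCE B (Python) =====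
-- from typing import List
--
-- def _split_data_blocks(lines: List[str]) -> List[List[str]]:
--     """Split CIF into data blocks (data_XXX): skip the prefix before the
--     first header, then repeatedly carve out [header .. next header)."""
--     def is_header(line: str) -> bool:
--         return line.strip().startswith('data_')
--
--     blocks: List[List[str]] = []
--     i = 0
--     while i < len(lines) and not is_header(lines[i]):   # drop the prefix
--         i += 1
--     while i < len(lines):                               # chunk the rest
--         j = i + 1
--         while j < len(lines) and not is_header(lines[j]):
--             j += 1
--         blocks.append(lines[i:j])
--         i = j
--     return blocks
-- ===== Notes on version B (the rewrite author's own statement) =====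
-- stated objective: alternative
-- what changed: Replaces the streaming accumulator with its blocks/current_block/in_block state by a two-phase skip-then-chunk scan: drop the prefix before the first header, then repeatedly slice out each [header, next header) segment.
import Mathlib
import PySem

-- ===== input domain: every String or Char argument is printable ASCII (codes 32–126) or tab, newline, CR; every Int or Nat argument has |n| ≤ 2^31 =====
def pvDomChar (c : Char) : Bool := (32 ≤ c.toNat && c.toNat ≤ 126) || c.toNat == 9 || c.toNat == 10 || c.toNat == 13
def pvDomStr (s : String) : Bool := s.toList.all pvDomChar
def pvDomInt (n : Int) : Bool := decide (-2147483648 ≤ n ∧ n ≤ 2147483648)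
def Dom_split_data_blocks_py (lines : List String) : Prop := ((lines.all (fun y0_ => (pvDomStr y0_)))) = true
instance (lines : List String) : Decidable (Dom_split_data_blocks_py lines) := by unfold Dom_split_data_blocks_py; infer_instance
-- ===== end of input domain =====

-- B replaces A's streaming accumulator (blocks/current_block/in_block) by a two-phase
-- skip-then-chunk scan; objective: alternative decomposition, same O(n) cost.

-- line.strip().startswith('data_')
def pvIsHeader (line : String) : Bool := PySem.Str.startswith (PySem.Str.strip line) "data_"

-- ===== PORT A =====
-- state: (blocks, current_block, in_block); Python truthiness `if current_block:` = cur ≠ []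
def pvStepA (s : List (List String) × List String × Bool) (line : String) :
    List (List String) × List String × Bool :=
  if pvIsHeader line then
    ((if s.2.1 ≠ [] then s.1 ++ [s.2.1] else s.1), [line], true)
  else if s.2.2 then (s.1, s.2.1 ++ [line], s.2.2)
  else s

def split_data_blocks_py (lines : List String) : List (List String) :=
  let st := lines.foldl pvStepA ([], [], false)
  if st.2.1 ≠ [] then st.1 ++ [st.2.1] else st.1

-- ===== PORT B =====
-- B's while-loops: the prefix skip is dropWhile (¬header); each chunk is the header
-- line followed by takeWhile (¬header), continuing at dropWhile (¬header) — exact.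
def pvChunkB : List String → List (List String)
  | [] => []
  | h :: t =>
      (h :: t.takeWhile (fun l => !pvIsHeader l)) :: pvChunkB (t.dropWhile (fun l => !pvIsHeader l))
termination_by l => l.length
decreasing_by
  simpa using Nat.lt_succ_of_le (List.length_dropWhile_le _ _)

def split_data_blocks_py_alt (lines : List String) : List (List String) :=
  pvChunkB (lines.dropWhile (fun l => !pvIsHeader l))

-- ===== PRECONDITION & SPEC =====
def Spec_split_data_blocks_py (lines : List String) (out : List (List String)) : Prop := out = split_data_blocks_py_alt lines
instance (lines : List String) (out : List (List String)) : Decidable (Spec_split_data_blocks_py lines out) := by unfold Spec_split_data_blocks_py; infer_instance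

-- ===== CLAIM (what is proved, stated in full; the proofs are below) =====
def Claim_equal_split_data_blocks_py : Prop := ∀ (lines : List String), Dom_split_data_blocks_py lines → Spec_split_data_blocks_py lines (split_data_blocks_py lines)

-- ===== LEMMAS AND PROOFS =====

def pvFinish (s : List (List String) × List String × Bool) : List (List String) :=
  if s.2.1 ≠ [] then s.1 ++ [s.2.1] else s.1

-- A's loop ignores non-header lines while not in a block
theorem pvFoldA_skip (lines : List String) :
    lines.foldl pvStepA ([], [], false)
      = (lines.dropWhile (fun l => !pvIsHeader l)).foldl pvStepA ([], [], false) := by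
  induction lines with
  | nil => rfl
  | cons l t ih =>
      by_cases h : pvIsHeader l
      · simp [h]
      · have hs : pvStepA ([], [], false) l = ([], [], false) := by
          simp [pvStepA, h]
        rw [List.foldl_cons, hs, ih, List.dropWhile_cons_of_pos (by simp [h])]

-- invariant: inside a block, the rest of A's loop produces the chunk decomposition
theorem pvFoldA_inblock (rest : List String) :
    ∀ (B0 : List (List String)) (cur : List String), cur ≠ [] →
    pvFinish (rest.foldl pvStepA (B0, cur, true))
      = B0 ++ ((cur ++ rest.takeWhile (fun l => !pvIsHeader l))
                :: pvChunkB (rest.dropWhile (fun l => !pvIsHeader l))) := by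
  induction rest with
  | nil =>
      intro B0 cur hc
      simp [pvFinish, hc, pvChunkB]
  | cons l t ih =>
      intro B0 cur hc
      by_cases h : pvIsHeader l
      · have step : pvStepA (B0, cur, true) l = (B0 ++ [cur], [l], true) := by
          simp [pvStepA, h, hc]
        simp only [List.foldl_cons, step]
        rw [ih (B0 ++ [cur]) [l] (by simp)]
        simp [h, pvChunkB]
      · have step : pvStepA (B0, cur, true) l = (B0, cur ++ [l], true) := by
          simp [pvStepA, h]
        simp only [List.foldl_cons, step]
        rw [ih B0 (cur ++ [l]) (by simp)]
        simp [h]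

-- the first surviving line after the prefix skip is a header
theorem pvDropWhile_head (lines : List String) (h : String) (t : List String)
    (e : lines.dropWhile (fun l => !pvIsHeader l) = h :: t) : pvIsHeader h = true := by
  induction lines with
  | nil => simp at e
  | cons a r ih =>
      by_cases ha : pvIsHeader a
      · rw [List.dropWhile_cons_of_neg (by simp [ha])] at e
        cases e; exact ha
      · rw [List.dropWhile_cons_of_pos (by simp [ha])] at e
        exact ih e

-- ===== VERDICT (by name: the statement is the Claim_ definition above) =====
theorem split_data_blocks_py_spec : Claim_equal_split_data_blocks_py := by
  intro lines _
  show split_data_blocks_py lines = split_data_blocks_py_alt lines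
  show pvFinish (lines.foldl pvStepA ([], [], false))
      = pvChunkB (lines.dropWhile (fun l => !pvIsHeader l))
  rw [pvFoldA_skip]
  cases e : lines.dropWhile (fun l => !pvIsHeader l) with
  | nil => simp [pvFinish, pvChunkB]
  | cons h t =>
      have hh := pvDropWhile_head lines h t e
      have step : pvStepA ([], [], false) h = ([], [h], true) := by
        simp [pvStepA, hh]
      simp only [List.foldl_cons, step]
      rw [pvFoldA_inblock t [] [h] (by simp)]
      simp [pvChunkB]
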